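-- pv_equiv track=rewrite | github.com/hwahyeon/solved-algorithms | Python/Codewars | Likes Vs Dislikes.py | like_or_dislike
-- ===== SOURCE A (Python) =====
-- def like_or_dislike(lst):
--     like, dislike = 0, 0
--     for i in lst:
--         if i == 'Like' and like == 0:
--             like += 1
--             dislike = 0
--         elif i == 'Like' and like > 0:
--             like -= 1
--             dislike = 0
--         elif i == 'Dislike' and dislike == 0:
--             dislike += 1
--             like = 0
--         elif i == 'Dislike' and dislike > 0:
--             dislike -= 1
--             like = 0
--     if like == dislike == 0:
--         return 'Nothing'
--     elif like > dislike:
--         return 'Like'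
--     else:
--         return 'Dislike'
-- ===== SOURCE B (Python) =====
-- def like_or_dislike(lst):
--     # Closed form: the answer is determined by the trailing run of equal votes
--     # in the Like/Dislike-filtered sequence: last vote if that run is odd, else 'Nothing'.
--     votes = [x for x in lst if x in ('Like', 'Dislike')]
--     if not votes:
--         return 'Nothing'
--     last = votes[-1]
--     k = 0
--     for x in reversed(votes):
--         if x != last:
--             break
--         k += 1
--     return last if k % 2 == 1 else 'Nothing'
-- ===== Notes on version B (the rewrite author's own statement) =====
-- stated objective: alternative
-- what changed: Replaces the forward toggle-machine simulation with a closed-form rule: filter to the Like/Dislike votes, then the answer is the last vote if its trailing run of equal votes has odd length, else 'Nothing' (correct because the state before any maximal run never equals the run's token).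
import Mathlib
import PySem

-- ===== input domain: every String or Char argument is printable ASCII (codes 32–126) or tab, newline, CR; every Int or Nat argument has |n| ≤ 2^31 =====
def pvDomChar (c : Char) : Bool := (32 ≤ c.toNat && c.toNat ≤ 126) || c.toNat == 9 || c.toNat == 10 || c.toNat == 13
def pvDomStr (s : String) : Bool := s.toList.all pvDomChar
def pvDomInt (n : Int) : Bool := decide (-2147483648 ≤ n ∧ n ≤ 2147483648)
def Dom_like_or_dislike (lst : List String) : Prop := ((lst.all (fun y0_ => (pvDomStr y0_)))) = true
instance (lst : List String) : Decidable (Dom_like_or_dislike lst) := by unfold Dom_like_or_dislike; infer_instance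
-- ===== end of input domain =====

-- B replaces A's toggle-machine simulation by a closed-form rule on the trailing run of the filtered votes; objective: alternative.

-- ===== PORT A =====
def like_or_dislike_step (st : Int × Int) (i : String) : Int × Int :=
  let like := st.1
  let dislike := st.2
  if i = "Like" ∧ like = 0 then (like + 1, 0)
  else if i = "Like" ∧ like > 0 then (like - 1, 0)
  else if i = "Dislike" ∧ dislike = 0 then (0, dislike + 1)
  else if i = "Dislike" ∧ dislike > 0 then (0, dislike - 1)
  else (like, dislike)

def like_or_dislike (lst : List String) : String :=
  let st := lst.foldl like_or_dislike_step (0, 0)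
  if st.1 = 0 ∧ st.2 = 0 then "Nothing"
  else if st.1 > st.2 then "Like"
  else "Dislike"

-- ===== PORT B =====
def pvIsVote (x : String) : Bool := x == "Like" || x == "Dislike"

def like_or_dislike_alt (lst : List String) : String :=
  let votes := lst.filter pvIsVote
  match votes.reverse with
  | [] => "Nothing"
  | last :: rest =>
      -- the reversed-loop-with-break counting k is exactly takeWhile's length
      let k := ((last :: rest).takeWhile (fun x => x == last)).length
      if k % 2 = 1 then last else "Nothing"

-- ===== PRECONDITION & SPEC =====
def Spec_like_or_dislike (lst : List String) (out : String) : Prop := out = like_or_dislike_alt lst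
instance (lst : List String) (out : String) : Decidable (Spec_like_or_dislike lst out) := by unfold Spec_like_or_dislike; infer_instance

-- ===== CLAIM (what is proved, stated in full; the proofs are below) =====
def Claim_equal_like_or_dislike : Prop := ∀ (lst : List String), Dom_like_or_dislike lst → Spec_like_or_dislike lst (like_or_dislike lst)

-- ===== LEMMAS AND PROOFS =====

-- proof-side string toggle machine
def pvMStep (state : String) (i : String) : String :=
  if i = "Like" then (if state = "Like" then "Nothing" else "Like")
  else if i = "Dislike" then (if state = "Dislike" then "Nothing" else "Dislike")
  else state

-- decode A's counter pair into the machine state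
def pvDecode (st : Int × Int) : String :=
  if st.1 = 0 ∧ st.2 = 0 then "Nothing"
  else if st.1 > st.2 then "Like"
  else "Dislike"

def pvGood (st : Int × Int) : Prop := st = (0, 0) ∨ st = (1, 0) ∨ st = (0, 1)

theorem pvStep_good {st : Int × Int} (h : pvGood st) (i : String) :
    pvGood (like_or_dislike_step st i) := by
  rcases h with h | h | h <;> subst h <;>
    simp only [like_or_dislike_step, pvGood] <;> split_ifs <;> simp_all

theorem pvStep_decode {st : Int × Int} (h : pvGood st) (i : String) :
    pvDecode (like_or_dislike_step st i) = pvMStep (pvDecode st) i := by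
  rcases h with h | h | h <;> subst h <;>
    by_cases hL : i = "Like" <;> by_cases hD : i = "Dislike" <;>
      simp_all [like_or_dislike_step, pvMStep, pvDecode]

theorem pvFold_decode (lst : List String) {st : Int × Int} (h : pvGood st) :
    pvDecode (lst.foldl like_or_dislike_step st) =
      lst.foldl pvMStep (pvDecode st) := by
  induction lst generalizing st with
  | nil => rfl
  | cons x xs ih =>
      simp only [List.foldl_cons]
      rw [ih (pvStep_good h x), pvStep_decode h x]

-- non-votes leave the machine state unchanged, so the fold over lst equals the fold over the filtered votes
theorem pvFold_filter (lst : List String) (s : String) :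
    lst.foldl pvMStep s = (lst.filter pvIsVote).foldl pvMStep s := by
  induction lst generalizing s with
  | nil => rfl
  | cons x xs ih =>
      by_cases hL : x = "Like"
      · simp [List.filter, pvIsVote, hL, List.foldl_cons, ih]
      · by_cases hD : x = "Dislike"
        · simp [List.filter, pvIsVote, hD, List.foldl_cons, ih]
        · have hnv : pvIsVote x = false := by simp [pvIsVote, hL, hD]
          have hstep : pvMStep s x = s := by simp [pvMStep, hL, hD]
          simp [List.filter, hnv, List.foldl_cons, hstep, ih]

-- B's value on a pure vote list, expressed on the REVERSED list
def pvH : List String → String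
  | [] => "Nothing"
  | x :: r => if ((x :: r).takeWhile (fun y => y == x)).length % 2 = 1 then x else "Nothing"

-- the machine over a vote list computes pvH of its reverse
theorem pvMachine_eq_pvH (r : List String)
    (hv : ∀ x ∈ r, pvIsVote x = true) :
    r.reverse.foldl pvMStep "Nothing" = pvH r := by
  induction r with
  | nil => rfl
  | cons x r' ih =>
      have hx : x = "Like" ∨ x = "Dislike" := by
        have := hv x (by simp)
        simp [pvIsVote] at this
        tauto
      have hv' : ∀ y ∈ r', pvIsVote y = true := fun y hy => hv y (by simp [hy])
      have hrw : (x :: r').reverse = r'.reverse ++ [x] := by simp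
      rw [hrw, List.foldl_append, ih hv']
      cases r' with
      | nil =>
          rcases hx with h | h <;> subst h <;> simp [pvH, pvMStep, List.foldl]
      | cons y r'' =>
          simp only [List.foldl_cons, List.foldl_nil]
          by_cases hyx : y = x
          · subst hyx
            -- trailing run extends: parity flips
            have hk : ((y :: y :: r'').takeWhile (fun z => z == y)).length
                = ((y :: r'').takeWhile (fun z => z == y)).length + 1 := by
              simp [List.takeWhile]
            simp only [pvH, hk]
            generalize ((y :: r'').takeWhile (fun z => z == y)).length = k
            by_cases hpar : k % 2 = 1
            · have h2 : ¬ (k + 1) % 2 = 1 := by omega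
              rcases hx with h | h <;> subst h <;> simp [pvMStep, hpar, h2]
            · have h2 : (k + 1) % 2 = 1 := by omega
              rcases hx with h | h <;> subst h <;> simp [pvMStep, hpar, h2]
          · -- new run of length 1; previous state is y or "Nothing", both ≠ x
            have hy : y = "Like" ∨ y = "Dislike" := by
              have := hv y (by simp)
              simp [pvIsVote] at this
              tauto
            have hne : (y == x) = false := by simp [hyx]
            have htw : ((x :: y :: r'').takeWhile (fun z => z == x)) = [x] := by
              simp [List.takeWhile, hne]
            have hgoal : pvH (x :: y :: r'') = x := by simp [pvH, htw]
            rw [hgoal]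
            have hprev : pvH (y :: r'') = y ∨ pvH (y :: r'') = "Nothing" := by
              simp only [pvH]; split_ifs <;> simp
            rcases hprev with hp | hp <;> rw [hp] <;>
              rcases hx with h | h <;> subst h <;>
                rcases hy with h2 | h2 <;>
                  first
                  | exact absurd h2 hyx
                  | simp [pvMStep, h2]

-- ===== VERDICT (by name: the statement is the Claim_ definition above) =====
theorem like_or_dislike_spec : Claim_equal_like_or_dislike := by
  intro lst _
  show like_or_dislike lst = like_or_dislike_alt lst
  have h1 : pvDecode (lst.foldl like_or_dislike_step (0, 0)) =
      lst.foldl pvMStep "Nothing" := pvFold_decode lst (Or.inl rfl)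
  have h2 := pvFold_filter lst "Nothing"
  have hv : ∀ x ∈ (lst.filter pvIsVote).reverse, pvIsVote x = true := by
    intro x hx
    simp only [List.mem_reverse, List.mem_filter] at hx
    exact hx.2
  have h3 := pvMachine_eq_pvH ((lst.filter pvIsVote).reverse) hv
  rw [List.reverse_reverse] at h3
  have hAB : pvDecode (lst.foldl like_or_dislike_step (0, 0)) =
      pvH ((lst.filter pvIsVote).reverse) := by rw [h1, h2, ← h3]
  have hA : like_or_dislike lst = pvDecode (lst.foldl like_or_dislike_step (0, 0)) := rfl
  have hB : like_or_dislike_alt lst = pvH ((lst.filter pvIsVote).reverse) := by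
    simp only [like_or_dislike_alt]
    rcases hrev : (lst.filter pvIsVote).reverse with _ | ⟨a, r⟩ <;> simp [pvH]
  rw [hA, hB, hAB]
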